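-- pv_equiv track=rewrite | github.com/MrBrantCode/unitest_baseline | mut_generate/mist_train_cf/cf_66039/solution.py | eliminate_nums
-- ===== SOURCE A (Python) =====
-- def eliminate_nums(arr):
--     frequency = {}
--     for num in arr:
--         if num in frequency:
--             frequency[num] += 1
--         else:
--             frequency[num] = 1
--
--     unique_nums = [num for num in frequency if frequency[num] <= 3]
--
--     for i in range(len(unique_nums)):
--         for j in range(i+1, len(unique_nums)):
--             if unique_nums[i] < unique_nums[j]:
--                 unique_nums[i], unique_nums[j] = unique_nums[j], unique_nums[i]
--
--     return unique_nums
-- ===== SOURCE B (Python) =====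
-- def eliminate_nums(arr):
--     s = sorted(arr, reverse=True)
--     if not s:
--         return []
--     res = []
--     cur, cnt = s[0], 1
--     for v in s[1:]:
--         if v == cur:
--             cnt += 1
--         else:
--             if cnt <= 3:
--                 res.append(cur)
--             cur, cnt = v, 1
--     if cnt <= 3:
--         res.append(cur)
--     return res
-- ===== Notes on version B (the rewrite author's own statement) =====
-- stated objective: faster
-- what changed: Replaces the frequency dict plus O(n^2) pairwise-swap sort with one descending sort followed by a single run-length grouping pass that emits each value whose run is at most 3.
import Mathlib
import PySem

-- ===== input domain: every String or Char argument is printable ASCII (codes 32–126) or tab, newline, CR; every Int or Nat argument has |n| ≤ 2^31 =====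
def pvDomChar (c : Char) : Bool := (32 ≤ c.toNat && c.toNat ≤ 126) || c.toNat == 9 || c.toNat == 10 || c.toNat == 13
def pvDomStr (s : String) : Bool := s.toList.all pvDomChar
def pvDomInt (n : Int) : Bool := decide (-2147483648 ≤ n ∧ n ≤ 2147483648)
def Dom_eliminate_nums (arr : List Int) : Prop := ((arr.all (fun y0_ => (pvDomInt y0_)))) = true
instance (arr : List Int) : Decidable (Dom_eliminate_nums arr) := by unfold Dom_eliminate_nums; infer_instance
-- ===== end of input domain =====

-- B replaces A's frequency dict + O(n^2) pairwise-swap sort by one descending sort and a single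
-- run-length grouping pass (objective: faster).

-- ===== PORT A =====
-- frequency = {}; for num in arr: if num in frequency: +=1 else =1
def pvFreq (arr : List Int) : PySem.Dict Int Int :=
  arr.foldl
    (fun d num =>
      if d.contains num then d.insert num (d.getD num 0 + 1) else d.insert num 1)
    PySem.Dict.empty

-- inner loop 'for j in range(i+1, n): if a[i] < a[j]: swap a[i], a[j]':
-- x is the value currently held at position i, the returned list is the suffix as the loop leaves it.
def pvExtractMax (x : Int) : List Int → Int × List Int
  | [] => (x, [])
  | y :: ys =>
      if x < y then ((pvExtractMax y ys).1, x :: (pvExtractMax y ys).2)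
      else ((pvExtractMax x ys).1, y :: (pvExtractMax x ys).2)

theorem pvExtractMax_length (x : Int) (l : List Int) :
    ((pvExtractMax x l).2).length = l.length := by
  induction l generalizing x with
  | nil => rfl
  | cons y ys ih => simp only [pvExtractMax]; split <;> simp [ih]

-- outer loop 'for i in range(n)': position i receives the max of the suffix, recurse on the rest.
def pvSelSortDesc : List Int → List Int
  | [] => []
  | x :: xs => (pvExtractMax x xs).1 :: pvSelSortDesc (pvExtractMax x xs).2
termination_by l => l.length
decreasing_by simp [pvExtractMax_length]

def eliminate_nums (arr : List Int) : List Int :=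
  let frequency := pvFreq arr
  let unique_nums := frequency.keys.filter (fun num => decide (frequency.getD num 0 ≤ 3))
  pvSelSortDesc unique_nums

-- ===== PORT B =====
-- the grouping loop: cur = current run value, cnt = its count so far
def pvRunPass (cur : Int) (cnt : Int) : List Int → List Int
  | [] => if cnt ≤ 3 then [cur] else []
  | v :: vs =>
      if v = cur then pvRunPass cur (cnt + 1) vs
      else if cnt ≤ 3 then cur :: pvRunPass v 1 vs else pvRunPass v 1 vs

def eliminate_nums_alt (arr : List Int) : List Int :=
  match PySem.List.sorted arr (fun x => x) true with
  | [] => []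
  | x :: rest => pvRunPass x 1 rest

-- ===== PRECONDITION & SPEC =====
def Spec_eliminate_nums (arr : List Int) (out : List Int) : Prop := out = eliminate_nums_alt arr
instance (arr : List Int) (out : List Int) : Decidable (Spec_eliminate_nums arr out) := by unfold Spec_eliminate_nums; infer_instance

-- ===== CLAIM (what is proved, stated in full; the proofs are below) =====
def Claim_equal_eliminate_nums : Prop := ∀ (arr : List Int), Dom_eliminate_nums arr → Spec_eliminate_nums arr (eliminate_nums arr)

-- ===== LEMMAS AND PROOFS =====

theorem pvExtractMax_perm (x : Int) (l : List Int) :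
    ((pvExtractMax x l).1 :: (pvExtractMax x l).2).Perm (x :: l) := by
  induction l generalizing x with
  | nil => exact List.Perm.refl _
  | cons y ys ih =>
      simp only [pvExtractMax]; split <;> dsimp only
      · exact (List.Perm.swap x _ _).trans ((ih y).cons x)
      · exact (List.Perm.swap y _ _).trans (((ih x).cons y).trans (List.Perm.swap x y ys))

theorem pvExtractMax_ge (x : Int) (l : List Int) :
    ∀ y ∈ x :: l, y ≤ (pvExtractMax x l).1 := by
  induction l generalizing x with
  | nil => simp [pvExtractMax]
  | cons y ys ih =>
      intro z hz
      simp only [pvExtractMax]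
      split
      · rename_i hlt
        rcases List.mem_cons.mp hz with rfl | hz'
        · exact le_of_lt (lt_of_lt_of_le hlt (ih y _ (List.mem_cons_self)))
        · exact ih y _ hz'
      · rename_i hge
        rcases List.mem_cons.mp hz with rfl | hz'
        · exact ih z _ (List.mem_cons_self)
        · rcases List.mem_cons.mp hz' with rfl | hz'' 
          · exact le_trans (le_of_not_gt hge) (ih x _ (List.mem_cons_self))
          · exact ih x _ (List.mem_cons.mpr (Or.inr hz''))

theorem pvSelSort_perm (l : List Int) : (pvSelSortDesc l).Perm l := by
  induction hl : l.length using Nat.strong_induction_on generalizing l with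
  | _ n ih =>
    cases l with
    | nil => simp [pvSelSortDesc]
    | cons x xs =>
        rw [pvSelSortDesc]
        have h1 : (pvSelSortDesc (pvExtractMax x xs).2).Perm (pvExtractMax x xs).2 := by
          refine ih ((pvExtractMax x xs).2.length) ?_ _ rfl
          simp [pvExtractMax_length, ← hl]
        exact (h1.cons _).trans (pvExtractMax_perm x xs)

theorem pvSelSort_pairwise (l : List Int) :
    (pvSelSortDesc l).Pairwise (fun a b => b ≤ a) := by
  induction hl : l.length using Nat.strong_induction_on generalizing l with
  | _ n ih =>
    cases l with
    | nil => simp [pvSelSortDesc]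
    | cons x xs =>
        rw [pvSelSortDesc]
        refine List.pairwise_cons.mpr ⟨?_, ?_⟩
        · intro b hb
          have hb' : b ∈ (pvExtractMax x xs).2 :=
            (pvSelSort_perm _).mem_iff.mp hb
          exact pvExtractMax_ge x xs b ((pvExtractMax_perm x xs).mem_iff.mp
            (List.mem_cons.mpr (Or.inr hb')))
        · refine ih ((pvExtractMax x xs).2.length) ?_ _ rfl
          simp [pvExtractMax_length, ← hl]

theorem pvGetD_zero_of_not_contains (d : PySem.Dict Int Int) (k : Int)
    (h : d.contains k = false) : d.getD k 0 = 0 := by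
  simp only [PySem.Dict.contains, List.any_eq_false, beq_iff_eq, Prod.forall] at h
  simp only [PySem.Dict.getD, PySem.Dict.get?]
  rw [List.find?_eq_none.mpr]
  · rfl
  · intro p hp
    simp only [beq_iff_eq]
    exact h p.1 p.2 (by simpa using hp)

theorem pvFreq_eq_counter (arr : List Int) : pvFreq arr = PySem.Dict.counter arr := by
  rw [← PySem.Dict.foldl_insert_getD_add_one_eq_counter]
  unfold pvFreq
  congr 1
  funext d num
  split
  · rfl
  · rename_i hc
    rw [pvGetD_zero_of_not_contains d num (Bool.of_not_eq_true hc)]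
    norm_num

-- membership characterisation of A's output
theorem memA (arr : List Int) (v : Int) :
    v ∈ eliminate_nums arr ↔ v ∈ arr ∧ (arr.count v : Int) ≤ 3 := by
  unfold eliminate_nums
  rw [(pvSelSort_perm _).mem_iff]
  simp [pvFreq_eq_counter, PySem.Dict.keys_counter, PySem.Dict.getD_counter,
    PySem.Set.mem_ofList, List.mem_filter]

theorem nodupA (arr : List Int) : (eliminate_nums arr).Nodup := by
  unfold eliminate_nums
  refine (pvSelSort_perm _).nodup_iff.mpr ?_
  rw [pvFreq_eq_counter]
  exact (PySem.Dict.nodup_keys_counter arr).filter _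

theorem pairwiseA (arr : List Int) : (eliminate_nums arr).Pairwise (· > ·) := by
  have h1 := pvSelSort_pairwise ((pvFreq arr).keys.filter
    (fun num => decide ((pvFreq arr).getD num 0 ≤ 3)))
  have h2 := nodupA arr
  unfold eliminate_nums at h2 ⊢
  exact (h1.and h2).imp (fun {a b} ⟨hle, hne⟩ => lt_of_le_of_ne hle (Ne.symm hne))

-- the grouping pass: membership, strict descent, and an upper bound, all at once
theorem pvRunPass_spec (l : List Int) : ∀ (cur cnt : Int),
    (∀ y ∈ l, y ≤ cur) → l.Pairwise (fun a b => b ≤ a) →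
    ((∀ v, v ∈ pvRunPass cur cnt l ↔
        (v = cur ∧ cnt + (l.count cur : Int) ≤ 3) ∨
        (v ∈ l ∧ v ≠ cur ∧ (l.count v : Int) ≤ 3)) ∧
      (pvRunPass cur cnt l).Pairwise (· > ·) ∧
      ∀ v ∈ pvRunPass cur cnt l, v ≤ cur) := by
  induction l with
  | nil =>
      intro cur cnt _ _
      refine ⟨fun v => ?_, ?_, ?_⟩
      · simp only [pvRunPass, List.count_nil]
        split <;> simp_all
      · simp only [pvRunPass]; split <;> simp
      · simp only [pvRunPass]; split <;> simp
  | cons y ys ih =>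
      intro cur cnt hle hpw
      have hys_le_y : ∀ z ∈ ys, z ≤ y := (List.pairwise_cons.mp hpw).1
      have hys_pw := (List.pairwise_cons.mp hpw).2
      by_cases hy : y = cur
      · subst hy
        obtain ⟨hm, hp, hb⟩ := ih y (cnt + 1) hys_le_y hys_pw
        have hstep : pvRunPass y cnt (y :: ys) = pvRunPass y (cnt + 1) ys := by
          simp [pvRunPass]
        rw [hstep]
        refine ⟨fun v => ?_, hp, hb⟩
        rw [hm v]
        constructor
        · rintro (⟨rfl, h⟩ | ⟨h1, h2, h3⟩)
          · exact Or.inl ⟨rfl, by rw [List.count_cons_self]; push_cast; omega⟩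
          · exact Or.inr ⟨List.mem_cons.mpr (Or.inr h1), h2,
              by rw [List.count_cons]; simp; omega⟩
        · rintro (⟨rfl, h⟩ | ⟨h1, h2, h3⟩)
          · exact Or.inl ⟨rfl, by rw [List.count_cons_self] at h; push_cast at h; omega⟩
          · refine Or.inr ⟨?_, h2, ?_⟩
            · rcases List.mem_cons.mp h1 with rfl | h1'
              · exact absurd rfl h2
              · exact h1'
            · rw [List.count_cons] at h3; simp at h3; omega
      · have hylt : y < cur := lt_of_le_of_ne (hle y List.mem_cons_self) hy
        have hcur_not : cur ∉ y :: ys := by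
          intro hc
          exact absurd (hle cur hc) (by
            rcases List.mem_cons.mp hc with rfl | hc'
            · exact absurd rfl hy
            · exact not_le.mpr (lt_of_le_of_lt (hys_le_y cur hc') hylt))
        have hcount0 : (y :: ys).count cur = 0 := List.count_eq_zero.mpr hcur_not
        obtain ⟨hm, hp, hb⟩ := ih y 1 (fun z hz => le_refl z |>.trans (hys_le_y z hz)) hys_pw
        have htail_lt : ∀ v ∈ pvRunPass y 1 ys, v < cur :=
          fun v hv => lt_of_le_of_lt (hb v hv) hylt
        have hmem : ∀ v, v ∈ pvRunPass y 1 ys ↔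
            (v ∈ y :: ys ∧ v ≠ cur ∧ ((y :: ys).count v : Int) ≤ 3) := by
          intro v
          rw [hm v]
          constructor
          · rintro (⟨rfl, h⟩ | ⟨h1, h2, h3⟩)
            · refine ⟨List.mem_cons_self, hy, by rw [List.count_cons]; simp; omega⟩
            · refine ⟨List.mem_cons.mpr (Or.inr h1), ?_, ?_⟩
              · rintro rfl; exact hcur_not (List.mem_cons.mpr (Or.inr h1))
              · rw [List.count_cons]; simp; omega
          · rintro ⟨h1, h2, h3⟩
            rcases List.mem_cons.mp h1 with rfl | h1'
            · exact Or.inl ⟨rfl, by rw [List.count_cons] at h3; simp at h3; omega⟩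
            · by_cases hvy : v = y
              · subst hvy
                exact Or.inl ⟨rfl, by rw [List.count_cons] at h3; simp at h3; omega⟩
              · exact Or.inr ⟨h1', hvy, by rw [List.count_cons] at h3; simp at h3; omega⟩
        have hstep : pvRunPass cur cnt (y :: ys) =
            if cnt ≤ 3 then cur :: pvRunPass y 1 ys else pvRunPass y 1 ys := by
          simp [pvRunPass, hy]
        rw [hstep]
        split
        · refine ⟨fun v => ?_, ?_, ?_⟩
          · simp only [List.mem_cons, hmem v]
            constructor
            · rintro (rfl | h)
              · exact Or.inl ⟨rfl, by rw [hcount0]; simpa⟩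
              · exact Or.inr h
            · rintro (⟨rfl, _⟩ | h)
              · exact Or.inl rfl
              · exact Or.inr h
          · exact List.pairwise_cons.mpr ⟨htail_lt, hp⟩
          · intro v hv
            rcases List.mem_cons.mp hv with rfl | hv'
            · exact le_refl v
            · exact le_of_lt (htail_lt v hv')
        · rename_i hcnt
          refine ⟨fun v => ?_, hp, fun v hv => le_of_lt (htail_lt v hv)⟩
          rw [hmem v]
          constructor
          · exact fun h => Or.inr h
          · rintro (⟨rfl, h⟩ | h)
            · rw [hcount0] at h; simp at h; omega
            · exact h
  
-- membership characterisation of B's output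
theorem memB (arr : List Int) (v : Int) :
    v ∈ eliminate_nums_alt arr ↔ v ∈ arr ∧ (arr.count v : Int) ≤ 3 := by
  unfold eliminate_nums_alt
  have hperm : (PySem.List.sorted arr (fun x => x) true).Perm arr :=
    PySem.List.sorted_perm arr (fun x => x) true
  have hpw : (PySem.List.sorted arr (fun x => x) true).Pairwise (fun a b => b ≤ a) :=
    PySem.List.sorted_pairwise_rev arr (fun x => x)
  cases hs : PySem.List.sorted arr (fun x => x) true with
  | nil =>
      rw [hs] at hperm
      have harr : arr = [] := hperm.symm.eq_nil
      subst harr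
      simp
  | cons x rest =>
      rw [hs] at hperm hpw
      have hle := (List.pairwise_cons.mp hpw).1
      obtain ⟨hm, _, _⟩ := pvRunPass_spec rest x 1 hle (List.pairwise_cons.mp hpw).2
      rw [hm v, ← hperm.mem_iff, ← hperm.count_eq]
      constructor
      · rintro (⟨rfl, h⟩ | ⟨h1, hne, h3⟩)
        · exact ⟨List.mem_cons_self, by rw [List.count_cons]; simp; omega⟩
        · refine ⟨List.mem_cons.mpr (Or.inr h1), ?_⟩
          rw [List.count_cons]
          have hbf : (x == v) = false := by
            rw [beq_eq_false_iff_ne]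
            exact fun h => hne h.symm
          simp [hbf]
          omega
      · rintro ⟨h1, h2⟩
        by_cases hvx : v = x
        · subst hvx
          exact Or.inl ⟨rfl, by rw [List.count_cons] at h2; simp at h2; omega⟩
        · refine Or.inr ⟨?_, hvx, ?_⟩
          · rcases List.mem_cons.mp h1 with rfl | h1'
            · exact absurd rfl hvx
            · exact h1'
          · rw [List.count_cons] at h2; simp at h2; omega

theorem pairwiseB (arr : List Int) : (eliminate_nums_alt arr).Pairwise (· > ·) := by
  unfold eliminate_nums_alt
  have hpw : (PySem.List.sorted arr (fun x => x) true).Pairwise (fun a b => b ≤ a) :=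
    PySem.List.sorted_pairwise_rev arr (fun x => x)
  cases hs : PySem.List.sorted arr (fun x => x) true with
  | nil => simp
  | cons x rest =>
      rw [hs] at hpw
      exact (pvRunPass_spec rest x 1 (List.pairwise_cons.mp hpw).1
        (List.pairwise_cons.mp hpw).2).2.1

-- two strictly descending lists with the same members are equal
theorem eq_of_pairwise_gt_of_mem_iff :
    ∀ (l₁ l₂ : List Int), l₁.Pairwise (· > ·) → l₂.Pairwise (· > ·) →
      (∀ v, v ∈ l₁ ↔ v ∈ l₂) → l₁ = l₂ := by
  intro l₁
  induction l₁ with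
  | nil =>
      intro l₂ _ _ hmem
      cases l₂ with
      | nil => rfl
      | cons y ys => exact absurd ((hmem y).mpr List.mem_cons_self) (List.not_mem_nil)
  | cons x xs ih =>
      intro l₂ h1 h2 hmem
      cases l₂ with
      | nil => exact absurd ((hmem x).mp List.mem_cons_self) (List.not_mem_nil)
      | cons y ys =>
          have hx2 : x ∈ y :: ys := (hmem x).mp List.mem_cons_self
          have hy1 : y ∈ x :: xs := (hmem y).mpr List.mem_cons_self
          have hxy : x = y := by
            rcases List.mem_cons.mp hx2 with rfl | hx'
            · rfl
            · rcases List.mem_cons.mp hy1 with rfl | hy'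
              · rfl
              · have := (List.pairwise_cons.mp h1).1 y hy'
                have := (List.pairwise_cons.mp h2).1 x hx'
                omega
          subst hxy
          have hxs : ∀ v, v ∈ xs ↔ v ∈ ys := by
            intro v
            constructor
            · intro hv
              have hvx : x > v := (List.pairwise_cons.mp h1).1 v hv
              rcases List.mem_cons.mp ((hmem v).mp (List.mem_cons.mpr (Or.inr hv))) with rfl | h
              · omega
              · exact h
            · intro hv
              have hvx : x > v := (List.pairwise_cons.mp h2).1 v hv
              rcases List.mem_cons.mp ((hmem v).mpr (List.mem_cons.mpr (Or.inr hv))) with rfl | h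
              · omega
              · exact h
          rw [ih ys (List.pairwise_cons.mp h1).2 (List.pairwise_cons.mp h2).2 hxs]

-- ===== VERDICT (by name: the statement is the Claim_ definition above) =====
theorem eliminate_nums_spec : Claim_equal_eliminate_nums := by
  intro arr _
  unfold Spec_eliminate_nums
  exact eq_of_pairwise_gt_of_mem_iff _ _ (pairwiseA arr) (pairwiseB arr)
    (fun v => (memA arr v).trans (memB arr v).symm)
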